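-- pv_equiv track=rewrite | github.com/FlorianRaediker/BwInf38Runde1 | Aufgabe5/aufgabe5.py | array_to_str
-- ===== SOURCE A (Python) =====
-- from typing import Iterable, Tuple
--
-- def array_to_str(shape: Tuple[int, int], array: int):
--     res = ""
--     width = shape[1]
--     height = shape[0]
--     for y in range(height-1, -1, -1):
--         for x in range(width-1, -1, -1):
--             res += "■ " if (array >> (y * width + x)) & 1 else "□ "
--         res += "\n"
--     return res[:-1]
-- ===== SOURCE B (Python) =====
-- def array_to_str(shape, array):
--     height, width = shape
--     n = width * height
--     bits = format(array % (1 << n), "b").zfill(n)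
--     return "\n".join(
--         "".join("■ " if c == "1" else "□ " for c in bits[i * width:(i + 1) * width])
--         for i in range(height)
--     )
-- ===== Notes on version B (the rewrite author's own statement) =====
-- stated objective: idiomatic
-- what changed: B renders the whole bitmask once as a zero-padded binary string via format(...).zfill(n) and then maps/joins its width-sized chunks into rows, instead of A's nested per-cell bit-shift-and-mask loops with string concatenation; Pre_ excludes shapes with width*height < 0 (meaningless negative grid dimensions), on which A still returns a degenerate string but B's shift by a negative count raises ValueError.
-- outside the precondition, e.g. on array_to_str((-1, 2), 0): A returns '', B raises ValueError; on array_to_str((2, -1), 5): A returns '\n', B raises ValueError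
import Mathlib
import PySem

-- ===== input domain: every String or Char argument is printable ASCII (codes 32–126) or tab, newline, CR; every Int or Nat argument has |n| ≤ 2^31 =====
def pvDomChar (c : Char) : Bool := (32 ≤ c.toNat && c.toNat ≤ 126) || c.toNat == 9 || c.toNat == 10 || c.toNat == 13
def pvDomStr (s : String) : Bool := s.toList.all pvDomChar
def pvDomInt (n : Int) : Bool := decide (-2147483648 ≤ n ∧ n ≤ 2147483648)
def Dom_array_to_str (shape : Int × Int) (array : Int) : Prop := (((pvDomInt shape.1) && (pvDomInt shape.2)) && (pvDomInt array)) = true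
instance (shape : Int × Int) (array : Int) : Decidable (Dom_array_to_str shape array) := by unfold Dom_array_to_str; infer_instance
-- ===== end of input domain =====

-- B renders the whole bitmask once as a zero-padded binary string and joins its width-sized
-- chunks into rows, instead of A's nested per-cell bit-shift loops (objective: idiomatic).

-- ===== PORT A =====
-- Strings are built as their lists of characters (Lean's String.append is opaque to the kernel).
-- Python's `>> k` is Lean's `>>> k` with k : Nat — the exponent y*width+x is ≥ 0 whenever the
-- loops run (y ≥ 0 and the inner loop is nonempty only for width ≥ 1), so `.toNat` is exact;
-- `& 1` is PySem.Int.band; truthiness of the int is `≠ 0`.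
def array_to_str (shape : Int × Int) (array : Int) : String :=
  let width := shape.2
  let height := shape.1
  let res : List Char :=
    (PySem.List.pyRange (height - 1) (-1) (-1)).foldl (fun res y =>
      ((PySem.List.pyRange (width - 1) (-1) (-1)).foldl (fun res x =>
        res ++ (if PySem.Int.band (array >>> (y * width + x).toNat) 1 ≠ 0
                then ['■', ' '] else ['□', ' '])) res) ++ ['\n']) []
  String.ofList (PySem.List.slice res none (some (-1)))

-- ===== PORT B =====
-- transliteration of Source B.  format(m, "b") for m ≥ 0 is pvFormatB, str.zfill is pvZfill
-- (both hand-ported, exact for nonnegative m); inside Pre_ (width*height ≥ 0) the shift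
-- count n = (width*height).toNat is exact, `array % (1 << n)` is PySem.Int.mod array (2^n)
-- (nonnegative, so `.toNat` is exact), and the slice bounds i*width, (i+1)*width are ≥ 0
-- whenever range(height) is nonempty, so drop/take is Python's slice.
def pvBinRec (m : Nat) : List Char :=
  if m = 0 then [] else pvBinRec (m / 2) ++ [if m % 2 = 1 then '1' else '0']
decreasing_by exact Nat.div_lt_self (by omega) (by omega)

def pvFormatB (m : Nat) : List Char := if m = 0 then ['0'] else pvBinRec m

def pvZfill (n : Nat) (s : List Char) : List Char := List.replicate (n - s.length) '0' ++ s

def array_to_str_alt (shape : Int × Int) (array : Int) : String :=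
  let height := shape.1
  let width := shape.2
  let n : Nat := (width * height).toNat
  let bits : List Char := pvZfill n (pvFormatB (PySem.Int.mod array (2 ^ n)).toNat)
  PySem.Str.join "\n" ((List.range height.toNat).map (fun i =>
    String.ofList (((bits.drop (i * width.toNat)).take width.toNat).flatMap
      (fun c => if c = '1' then ['■', ' '] else ['□', ' ']))))

-- ===== PRECONDITION & SPEC =====
-- Pre_ excludes shapes with width*height < 0 (meaningless negative grid dimensions): there A
-- still returns a degenerate string, but B's shift by the negative count raises ValueError.
def Pre_array_to_str (shape : Int × Int) (array : Int) : Prop := 0 ≤ shape.2 * shape.1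
instance (shape : Int × Int) (array : Int) : Decidable (Pre_array_to_str shape array) := by unfold Pre_array_to_str; infer_instance
def pvWitness_array_to_str : (Int × Int) × Int := ((2, 3), 5)
def Spec_array_to_str (shape : Int × Int) (array : Int) (out : String) : Prop := out = array_to_str_alt shape array
instance (shape : Int × Int) (array : Int) (out : String) : Decidable (Spec_array_to_str shape array out) := by unfold Spec_array_to_str; infer_instance

-- ===== CLAIM (what is proved, stated in full; the proofs are below) =====
def Claim_equal_array_to_str : Prop := ∀ (shape : Int × Int) (array : Int), Dom_array_to_str shape array → Pre_array_to_str shape array → Spec_array_to_str shape array (array_to_str shape array)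

-- ===== LEMMAS AND PROOFS =====

-- Python's arithmetic right shift is floor division by the power of two.
theorem pv_shiftRight_fdiv (a : Int) (k : Nat) : a >>> k = Int.fdiv a (2 ^ k) := by
  cases a with
  | ofNat m =>
      show Int.ofNat (m >>> k) = _
      rw [Nat.shiftRight_eq_div_pow, show ((2:Int)^k) = ((2^k : Nat) : Int) by push_cast; ring]
      rw [show (Int.ofNat m) = ((m : Nat) : Int) from rfl, ← Int.ofNat_fdiv m (2 ^ k)]
      rfl
  | negSucc m =>
      have h1 : (1:Nat) ≤ 2 ^ k := Nat.one_le_two_pow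
      have h : ((2:Int)^k) = Int.ofNat ((2 ^ k - 1) + 1) := by simp [Int.ofNat_eq_natCast]
      rw [h]
      show Int.negSucc (m >>> k) = Int.negSucc (m / ((2 ^ k - 1) + 1))
      rw [Nat.shiftRight_eq_div_pow]
      congr 2
      omega

-- A's cell test `(a >> k) & 1 != 0` reads bit k of the low n bits of a (two's complement).
theorem pv_bitA (a : Int) (n k : ℕ) (hk : k < n) :
    (PySem.Int.band (a >>> k) 1 ≠ 0) ↔ ((a.emod ((2:Int)^n)).toNat.testBit k = true) := by
  have h2n : (0:Int) < 2 ^ n := by positivity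
  rw [PySem.Int.band_one, PySem.Int.mod_eq_emod_of_pos (by norm_num : (0:Int) < 2), pv_shiftRight_fdiv]
  set r := a.emod (2 ^ n) with hr
  have hr0 : 0 ≤ r := Int.emod_nonneg a (by positivity)
  have hrlt : r < 2 ^ n := Int.emod_lt_of_pos a h2n
  have hpow : (2:Int)^(n-k) * 2^k = 2^n := by rw [← pow_add]; congr 1; omega
  obtain ⟨q, hq⟩ : ∃ q : Int, a = r + 2^(n-k) * q * 2^k := by
    refine ⟨a / 2^n, ?_⟩
    have h := Int.emod_add_mul_ediv a (2^n)
    have h2 : 2^(n-k) * (a/2^n) * 2^k = 2^n * (a/2^n) := by rw [← hpow]; ring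
    have h' : r + 2^n * (a/2^n) = a := h
    linarith [h', h2]
  conv_lhs => rw [hq]
  rw [Int.add_mul_fdiv_right _ _ (by positivity : ((2:Int)^k) ≠ 0)]
  have hfr : Int.fdiv r (2^k) = ((r.toNat / 2^k : Nat) : Int) := by
    rw [show r = ((r.toNat : Nat) : Int) by omega, show ((2:Int)^k) = ((2^k : Nat):Int) by push_cast; ring]
    exact (Int.ofNat_fdiv _ _).symm
  rw [hfr]
  have heven : ((2:Int)^(n-k)) = 2 * 2^(n-k-1) := by rw [← pow_succ']; congr 1; omega
  rw [heven, mul_assoc, Int.add_mul_emod_self_left, Nat.testBit_eq_decide_div_mod_eq]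
  simp only [decide_eq_true_eq]
  omega

-- the n-bit binary rendering of M, MSB first (proof-side reference)
def pvPadBits (M n : ℕ) : List Char :=
  (List.range n).map (fun i => if M.testBit (n - 1 - i) then '1' else '0')

def pvCell (b : Bool) : List Char := if b then ['■', ' '] else ['□', ' ']

-- row i of B's output, as a function of the bit matrix (proof-side reference)
def pvRowB (M n W : ℕ) (i : ℕ) : List Char :=
  (List.range W).flatMap (fun j => pvCell (M.testBit (n - 1 - (i * W + j))))

theorem pv_padBits_zero (n : ℕ) : pvPadBits 0 n = List.replicate n '0' := by
  unfold pvPadBits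
  simp [Nat.zero_testBit, List.map_const']

theorem pv_padBits_succ (M k : ℕ) :
    pvPadBits M (k + 1) = pvPadBits (M / 2) k ++ [if M.testBit 0 then '1' else '0'] := by
  unfold pvPadBits
  rw [List.range_succ, List.map_append]
  congr 1
  · apply List.map_congr_left
    intro i hi
    simp only [List.mem_range] at hi
    rw [show k + 1 - 1 - i = (k - 1 - i) + 1 from by omega, Nat.testBit_succ]
  · simp

-- the zero-filled hand-rolled binary rendering is the n-bit MSB-first bit string
theorem pv_zfill_bin (k : ℕ) : ∀ M : ℕ, M < 2 ^ k →
    List.replicate (k - (pvBinRec M).length) '0' ++ pvBinRec M = pvPadBits M k := by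
  induction k with
  | zero =>
      intro M hM
      interval_cases M
      simp [pvBinRec, pvPadBits]
  | succ k ih =>
      intro M hM
      by_cases h0 : M = 0
      · subst h0
        rw [show pvBinRec 0 = [] from by rw [pvBinRec]; simp]
        simp [pv_padBits_zero]
      · rw [pv_padBits_succ]
        conv_lhs => rw [pvBinRec, if_neg h0]
        have hlsb : (if M % 2 = 1 then '1' else '0') = (if M.testBit 0 then '1' else '0') := by
          rw [Nat.testBit_zero]
          rcases Nat.mod_two_eq_zero_or_one M with h | h <;> simp [h]
        rw [← ih (M / 2) (by omega), hlsb]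
        simp only [List.length_append, List.length_singleton]
        rw [show k + 1 - ((pvBinRec (M / 2)).length + 1) = k - (pvBinRec (M / 2)).length from by
          omega]
        simp [List.append_assoc]

theorem pv_bits (n M : ℕ) (hn : 1 ≤ n) (hM : M < 2 ^ n) :
    pvZfill n (pvFormatB M) = pvPadBits M n := by
  by_cases h0 : M = 0
  · subst h0
    unfold pvZfill pvFormatB
    rw [if_pos rfl, pv_padBits_zero,
      show n = (n - 1) + 1 from by omega]
    simp [List.replicate_succ']
  · unfold pvZfill pvFormatB
    rw [if_neg h0]
    exact pv_zfill_bin n M hM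

theorem pv_chunk {α : Type} (f : ℕ → α) (n a b : ℕ) (h : a + b ≤ n) :
    (((List.range n).map f).drop a).take b = (List.range b).map (fun j => f (a + j)) := by
  apply List.ext_getElem
  · simp; omega
  · intro i h1 h2
    simp only [List.getElem_take, List.getElem_drop, List.getElem_map, List.getElem_range]

theorem pv_dropLast_flatMap (rows : List (List Char)) (h : rows ≠ []) :
    (rows.flatMap (fun r => r ++ ['\n'])).dropLast = List.intercalate ['\n'] rows := by
  induction rows with
  | nil => simp at h
  | cons r rest ih =>
      cases rest with
      | nil => simp [List.intercalate]
      | cons r2 rest2 =>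
          rw [List.flatMap_cons, List.append_assoc,
            List.dropLast_append_of_ne_nil (by simp [List.flatMap]),
            List.dropLast_append_of_ne_nil (by simp [List.flatMap]),
            ih (by simp)]
          simp [List.intercalate, List.intersperse]

theorem pv_idx (H W k j : ℕ) (hk : k < H) (hj : j < W) :
    W * H - 1 - (k * W + j) = (H - 1 - k) * W + (W - 1 - j) := by
  obtain ⟨k', rfl⟩ : ∃ k', H = k + k' + 1 := ⟨H - k - 1, by omega⟩
  obtain ⟨j', rfl⟩ : ∃ j', W = j + j' + 1 := ⟨W - j - 1, by omega⟩
  have h1 : k + k' + 1 - 1 - k = k' := by omega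
  have h2 : j + j' + 1 - 1 - j = j' := by omega
  rw [h1, h2]
  have h3 : (j + j' + 1) * (k + k' + 1) = (k * (j + j' + 1) + j) + (k' * (j + j' + 1) + j') + 1 := by ring
  omega

theorem pv_join_ofList (l : List (List Char)) :
    PySem.Str.join "\n" (l.map String.ofList) = String.ofList (List.intercalate ['\n'] l) := by
  rw [← String.toList_inj, PySem.Str.toList_join]
  simp [PySem.Chars.join, List.map_map, Function.comp_def]

theorem pv_flatMap_const {α : Type} (l : List α) (c : Char) :
    l.flatMap (fun _ => [c]) = List.replicate l.length c := by
  induction l with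
  | nil => simp
  | cons x xs ih => simp [ih, List.replicate_succ]

theorem pv_intercalate_replicate_nil (H : ℕ) (hH : 1 ≤ H) :
    List.intercalate ['\n'] (List.replicate H ([] : List Char)) = List.replicate (H - 1) '\n' := by
  induction H with
  | zero => omega
  | succ H ih =>
      cases H with
      | zero => simp [List.intercalate]
      | succ H' =>
          rw [List.replicate_succ,
            show List.intercalate ['\n'] ([] :: List.replicate (H' + 1) ([] : List Char)) =
              ['\n'] ++ List.intercalate ['\n'] (List.replicate (H' + 1) ([] : List Char)) from by
                simp [List.intercalate, List.replicate_succ],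
            ih (by omega)]
          simp [List.replicate_succ]

-- ===== VERDICT (by name: the statement is the Claim_ definition above) =====
theorem array_to_str_spec : Claim_equal_array_to_str := by
  intro shape array _ hpre
  obtain ⟨h, w⟩ := shape
  have hwh : (0:Int) ≤ w * h := hpre
  show array_to_str (h, w) array = array_to_str_alt (h, w) array
  simp only [array_to_str, array_to_str_alt]
  by_cases hh : h ≤ 0
  · rw [PySem.List.pyRange_neg_one_eq_nil (by omega : h - 1 ≤ -1),
      show h.toNat = 0 from by omega]
    rw [← String.toList_inj, PySem.Str.toList_join]
    simp [PySem.List.slice_to_neg_one, PySem.Chars.join, List.intercalate]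
  · by_cases hw : w ≤ 0
    · -- inside Pre_ with h > 0 this forces w = 0: empty rows on both sides
      have hw0 : w = 0 := by nlinarith
      subst hw0
      rw [PySem.List.pyRange_neg_one_eq_nil (by omega : (0:Int) - 1 ≤ -1)]
      simp only [List.foldl_nil]
      rw [PySem.List.foldl_append_eq_flatMap (fun _ => ['\n']), pv_flatMap_const,
        PySem.List.length_pyRange_neg_one, PySem.List.slice_to_neg_one]
      have hB : ((List.range h.toNat).map (fun i =>
          String.ofList ((((pvZfill ((0 * h).toNat)
              (pvFormatB (PySem.Int.mod array (2 ^ (0 * h).toNat)).toNat)).drop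
                (i * (0:Int).toNat)).take (0:Int).toNat).flatMap
            (fun c => if c = '1' then ['■', ' '] else ['□', ' '])))) =
          (List.replicate h.toNat ([] : List Char)).map String.ofList := by
        rw [List.map_replicate]
        apply List.ext_getElem
        · simp
        · intro i h1 h2
          simp [Int.toNat_zero, List.take_zero]
      rw [hB, pv_join_ofList, pv_intercalate_replicate_nil h.toNat (by omega)]
      congr 1
      rw [List.nil_append, show (h - 1 - -1).toNat = (h - 1).toNat + 1 from by omega]
      rw [show h.toNat - 1 = (h - 1).toNat from by omega]
      simp [List.dropLast_eq_take, List.take_replicate]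
    · set W := w.toNat with hWdef
      set H := h.toNat with hHdef
      have hW1 : 1 ≤ W := by omega
      have hH1 : 1 ≤ H := by omega
      have hwW : w = (W : Int) := by omega
      have hhH : h = (H : Int) := by omega
      have hn : (w * h).toNat = W * H := by
        rw [hwW, hhH, ← Nat.cast_mul, Int.toNat_natCast]
      rw [hn]
      have hpos : (0:Int) < 2 ^ (W * H) := by positivity
      set M := (PySem.Int.mod array (2 ^ (W * H))).toNat with hMdef
      have hMlt : M < 2 ^ (W * H) := by
        have hlt : PySem.Int.mod array (2 ^ (W * H)) < 2 ^ (W * H) := by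
          rw [PySem.Int.mod_eq_emod_of_pos hpos]
          exact Int.emod_lt_of_pos array hpos
        have hge : 0 ≤ PySem.Int.mod array (2 ^ (W * H)) := PySem.Int.mod_nonneg array hpos
        have hcast : ((2 ^ (W * H) : ℕ) : Int) = (2 : Int) ^ (W * H) := by push_cast; ring
        omega
      rw [pv_bits (W * H) M
        (Nat.one_le_iff_ne_zero.mpr (Nat.mul_ne_zero (by omega) (by omega))) hMlt]
      have hrows : (List.range H).map
          (fun i => String.ofList
            (List.flatMap (fun c => if c = '1' then ['■', ' '] else ['□', ' '])
              (List.take W (List.drop (i * W) (pvPadBits M (W * H)))))) =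
          (List.range H).map (fun i => String.ofList (pvRowB M (W * H) W i)) := by
        apply List.map_congr_left
        intro i hi
        simp only [List.mem_range] at hi
        congr 1
        unfold pvPadBits
        rw [pv_chunk _ _ _ _ (by nlinarith : i * W + W ≤ W * H)]
        rw [List.flatMap_map]
        unfold pvRowB
        apply List.flatMap_congr
        intro j hj
        simp only [List.mem_range] at hj
        unfold pvCell
        rcases Bool.eq_false_or_eq_true (M.testBit (W * H - 1 - (i * W + j))) with hb | hb <;>
          simp [hb]
      have hcomp : (fun i => String.ofList (pvRowB M (W * H) W i))
          = String.ofList ∘ pvRowB M (W * H) W := rfl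
      rw [hrows, hcomp, ← List.map_map, pv_join_ofList]
      simp only [PySem.List.foldl_append_eq_flatMap, List.append_assoc]
      simp only [List.nil_append]
      rw [PySem.List.slice_to_neg_one]
      simp only [PySem.List.pyRange_neg_one, List.flatMap_map]
      rw [show (h - 1 - -1).toNat = H from by omega]
      simp only [show (w - 1 - -1).toNat = W from by omega]
      rw [← pv_dropLast_flatMap ((List.range H).map (pvRowB M (W * H) W)) (by simp; omega)]
      congr 1
      rw [List.flatMap_map]
      congr 1
      apply List.flatMap_congr
      intro k hk
      simp only [List.mem_range] at hk
      congr 1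
      unfold pvRowB
      apply List.flatMap_congr
      intro j hj
      simp only [List.mem_range] at hj
      have he : ((h - 1 - (k:Int)) * w + (w - 1 - (j:Int))).toNat
          = (H - 1 - k) * W + (W - 1 - j) := by
        rw [hwW, hhH, show ((H:Int) - 1 - (k:Int)) = ((H - 1 - k : ℕ) : Int) from by omega,
          show ((W:Int) - 1 - (j:Int)) = ((W - 1 - j : ℕ) : Int) from by omega,
          ← Nat.cast_mul, ← Nat.cast_add, Int.toNat_natCast]
      rw [he, ← pv_idx H W k j hk hj]
      have hwh1 : 1 ≤ W * H := Nat.one_le_iff_ne_zero.mpr (by positivity)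
      have hlt : W * H - 1 - (k * W + j) < W * H := by omega
      have hbit : (PySem.Int.band (array >>> (W * H - 1 - (k * W + j))) 1 ≠ 0)
          ↔ (M.testBit (W * H - 1 - (k * W + j)) = true) := by
        rw [hMdef, PySem.Int.mod_eq_emod_of_pos hpos]
        exact pv_bitA array _ _ hlt
      unfold pvCell
      simp only [hbit]
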